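-- pv_equiv track=rewrite | github.com/shivankj11/Hack112 | fullDataAnalysis.py | decipherData
-- ===== SOURCE A (Python) =====
-- def decipherData(dataDictionary):
--     newDataDictionary={} #the cleaned up dictionary
--     for entry in dataDictionary:
--         stringList=dataDictionary[entry] #gets list of excerpts from category
--         newList=[] #list of cleaned up strings
--         for string in stringList:
--             inArrows=False
--             #checks if the value in the string is part of the html or actual language
--             currString="" #creates cleaned string
--             for char in string:
--                 if char=="<":
--                     inArrows=True
--                 if not inArrows and char!="\n" and char!="\'":
--                     currString+=char
--                 if char==">":
--                     inArrows=False
--             newList.append(currString)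
--         newDataDictionary[entry]=newList
--     return newDataDictionary
-- ===== SOURCE B (Python) =====
-- def decipherData(dataDictionary):
--     def clean(string):
--         # collect the segments of text lying outside <...> tags, then drop newlines/apostrophes
--         parts = []
--         rest = string
--         while True:
--             j = rest.find('<')
--             if j == -1:
--                 parts.append(rest)
--                 break
--             parts.append(rest[:j])
--             k = rest.find('>', j + 1)
--             if k == -1:
--                 break
--             rest = rest[k + 1:]
--         kept = ''.join(parts)
--         return ''.join(c for c in kept if c != '\n' and c != "'")
--     return {key: [clean(s) for s in values] for key, values in dataDictionary.items()}
-- ===== Notes on version B (the rewrite author's own statement) =====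
-- stated objective: alternative
-- what changed: Replaces A's per-character inArrows state machine with find-based tag skipping: B slices out the text segments between each '<' and its closing '>', joins them, and then filters out newlines and apostrophes; the dict is rebuilt by a comprehension over items instead of key iteration with re-lookup.
import Mathlib
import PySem

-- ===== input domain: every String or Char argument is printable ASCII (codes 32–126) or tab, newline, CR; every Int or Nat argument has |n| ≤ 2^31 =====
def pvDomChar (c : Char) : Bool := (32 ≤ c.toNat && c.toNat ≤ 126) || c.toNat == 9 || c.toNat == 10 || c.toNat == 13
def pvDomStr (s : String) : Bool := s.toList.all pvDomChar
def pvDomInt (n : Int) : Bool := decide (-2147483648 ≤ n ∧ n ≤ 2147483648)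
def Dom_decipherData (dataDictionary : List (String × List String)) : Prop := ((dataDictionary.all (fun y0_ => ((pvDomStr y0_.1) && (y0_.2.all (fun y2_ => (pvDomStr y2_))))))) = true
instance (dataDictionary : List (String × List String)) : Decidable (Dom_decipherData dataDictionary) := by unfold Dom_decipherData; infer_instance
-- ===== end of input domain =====

-- B replaces A's per-character inArrows state machine by find-based tag skipping: it slices out the
-- segments between <...> tags and filters '\n'/'\'' from the kept text (objective: alternative).

-- ===== PORT A =====
-- the body of A's inner 'for char in string' loop: state = (inArrows, currString)
def pvStepA (st : Bool × List Char) (char : Char) : Bool × List Char :=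
  let inArrows := if char = '<' then true else st.1
  let cur := if inArrows = false ∧ char ≠ '\n' ∧ char ≠ '\'' then st.2 ++ [char] else st.2
  (if char = '>' then false else inArrows, cur)

-- A's inner loop over one string (inArrows=False, currString="")
def pvCleanA (string : String) : String :=
  String.mk (string.toList.foldl pvStepA (false, [])).2

def decipherData (dataDictionary : List (String × List String)) : List (String × List String) :=
  -- 'for entry in dataDictionary' iterates the dict's keys; dataDictionary[entry] is the lookup
  -- (entry is always a present key, so getD's default is never used)
  let src : PySem.Dict String (List String) := PySem.Dict.mk dataDictionary
  (dataDictionary.foldl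
    (fun newDataDictionary entry =>
      let stringList := src.getD entry.1 []
      let newList := stringList.foldl (fun newList string => newList ++ [pvCleanA string]) []
      newDataDictionary.insert entry.1 newList)
    PySem.Dict.empty).items

-- ===== PORT B =====
def pvKeep (c : Char) : Bool := c != '\n' && c != '\''

-- Source B's 'while True' loop collecting the text segments outside tags ('parts'); fuel only
-- totalizes the recursion (it starts at length+1 and never runs out)
def pvSegs : Nat → List Char → List (List Char)
  | 0, _ => []
  | fuel + 1, rest =>
    let j := PySem.Chars.find rest ['<']
    if j = -1 then [rest]
    else
      let k := PySem.Chars.findFrom rest ['>'] (j + 1)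
      if k = -1 then [PySem.List.slice rest none (some j)]
      else PySem.List.slice rest none (some j) :: pvSegs fuel (PySem.List.slice rest (some (k + 1)) none)

-- Source B's clean: join the segments, drop '\n' and '\''
def pvCleanB (string : String) : String :=
  let kept := (pvSegs (string.toList.length + 1) string.toList).flatten
  String.mk (kept.filter pvKeep)

def decipherData_alt (dataDictionary : List (String × List String)) : List (String × List String) :=
  dataDictionary.map (fun p => (p.1, p.2.map pvCleanB))

-- ===== PRECONDITION & SPEC =====
-- Pre_ excludes association lists with duplicate keys: those do not represent a Python dict
-- (the dict literal collapses them before A ever runs), so the ports' behaviour there is unspecified.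
def Pre_decipherData (dataDictionary : List (String × List String)) : Prop :=
  (dataDictionary.map Prod.fst).Nodup
instance (dataDictionary : List (String × List String)) : Decidable (Pre_decipherData dataDictionary) := by
  unfold Pre_decipherData; infer_instance

def pvWitness_decipherData : (List (String × List String)) :=
  [("quote", ["<p>It's<br>fine</p>", "a<b", "x > y\n"]), ("empty", [])]

def Spec_decipherData (dataDictionary : List (String × List String)) (out : List (String × List String)) : Prop := out = decipherData_alt dataDictionary
instance (dataDictionary : List (String × List String)) (out : List (String × List String)) : Decidable (Spec_decipherData dataDictionary out) := by unfold Spec_decipherData; infer_instance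

-- ===== CLAIM (what is proved, stated in full; the proofs are below) =====
def Claim_equal_decipherData : Prop := ∀ (dataDictionary : List (String × List String)), Dom_decipherData dataDictionary → Pre_decipherData dataDictionary → Spec_decipherData dataDictionary (decipherData dataDictionary)

-- ===== LEMMAS AND PROOFS =====

-- proof-only intermediate form of the tag stripper: cons-by-cons
def pvDropTag : List Char → List Char
  | [] => []
  | c :: rest => if c = '>' then rest else pvDropTag rest

lemma pvDropTag_length_le (cs : List Char) : (pvDropTag cs).length ≤ cs.length := by
  induction cs with
  | nil => simp [pvDropTag]
  | cons c rest ih => simp only [pvDropTag]; split <;> simp <;> omega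

def pvStripTags : List Char → List Char
  | [] => []
  | c :: rest =>
    if c = '<' then pvStripTags (pvDropTag rest) else c :: pvStripTags rest
termination_by cs => cs.length
decreasing_by
  · have := pvDropTag_length_le rest; simp; omega
  · simp

-- A's char loop computes filter pvKeep ∘ pvStripTags
lemma pvFoldA (cs : List Char) :
    (∀ acc : List Char, (cs.foldl pvStepA (true, acc)).2
        = acc ++ (pvStripTags (pvDropTag cs)).filter pvKeep)
    ∧ (∀ acc : List Char, (cs.foldl pvStepA (false, acc)).2
        = acc ++ (pvStripTags cs).filter pvKeep) := by
  induction cs with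
  | nil => simp [pvStripTags, pvDropTag]
  | cons c rest ih =>
    obtain ⟨ihT, ihF⟩ := ih
    constructor
    · intro acc
      by_cases hlt : c = '<'
      · subst hlt
        simpa [List.foldl_cons, pvStepA, pvDropTag] using ihT acc
      · by_cases hgt : c = '>'
        · subst hgt
          simpa [List.foldl_cons, pvStepA, pvDropTag] using ihF acc
        · simpa [List.foldl_cons, pvStepA, pvDropTag, hlt, hgt] using ihT acc
    · intro acc
      by_cases hlt : c = '<'
      · subst hlt
        simpa [List.foldl_cons, pvStepA, pvStripTags] using ihT acc
      · have hstep : pvStepA (false, acc) c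
            = (false, if pvKeep c then acc ++ [c] else acc) := by
          simp [pvStepA, pvKeep, hlt]
        rw [List.foldl_cons, hstep]
        by_cases hk : pvKeep c
        · rw [if_pos hk, ihF]
          simp [pvStripTags, hlt, List.filter_cons, hk]
        · rw [if_neg hk, ihF]
          simp [pvStripTags, hlt, List.filter_cons, hk]

lemma pvCleanA_eq (s : String) :
    pvCleanA s = String.mk ((pvStripTags s.toList).filter pvKeep) := by
  unfold pvCleanA
  rw [(pvFoldA s.toList).2]
  simp

-- splitting a list at the first occurrence of a character
lemma pvSplit (c : Char) (cs : List Char) (h : c ∈ cs) :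
    ∃ r, cs = cs.takeWhile (fun x => x ≠ c) ++ c :: r := by
  induction cs with
  | nil => simp at h
  | cons d l ih =>
    by_cases hd : d = c
    · subst hd
      exact ⟨l, by simp [List.takeWhile_cons]⟩
    · have hcl : c ∈ l := by
        rcases List.mem_cons.1 h with h1 | h1
        · exact absurd h1.symm hd
        · exact h1
      obtain ⟨r, hr⟩ := ih hcl
      refine ⟨r, ?_⟩
      rw [List.takeWhile_cons, if_pos (by simp [hd]), List.cons_append]
      exact congrArg _ hr

lemma pvTakeWhile_not_mem (cs : List Char) (c : Char) :
    c ∉ cs.takeWhile (fun x => x ≠ c) := by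
  intro h
  have := List.mem_takeWhile_imp h
  simp at this

-- find of a single character, in takeWhile form
lemma pvFind_singleton (cs : List Char) (c : Char) :
    PySem.Chars.find cs [c]
      = if c ∈ cs then ((cs.takeWhile (fun x => x ≠ c)).length : Int) else -1 := by
  by_cases hmem : c ∈ cs
  · rw [if_pos hmem]
    obtain ⟨r, hcs⟩ := pvSplit c cs hmem
    set t := cs.takeWhile (fun x => x ≠ c) with htdef
    have hinf : [c] <:+: cs := (List.singleton_infix_iff c cs).2 hmem
    have hpos : 0 ≤ PySem.Chars.find cs [c] := (PySem.Chars.find_nonneg_iff cs [c]).2 hinf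
    obtain ⟨hpre, hmin⟩ := PySem.Chars.find_spec hpos
    have hdropn : cs.drop t.length = c :: r := by rw [hcs]; exact List.drop_left
    have hprefn : [c] <+: cs.drop t.length := by rw [hdropn]; exact ⟨r, rfl⟩
    set m := (PySem.Chars.find cs [c]).toNat with hm
    have hfind : PySem.Chars.find cs [c] = (m : Int) := (Int.toNat_of_nonneg hpos).symm
    have hmn : m = t.length := by
      rcases lt_trichotomy m t.length with h | h | h
      · exfalso
        obtain ⟨v, hv⟩ := hpre
        have hcm : cs[m]? = some c := by
          have h0 : (cs.drop m)[0]? = some c := by rw [← hv]; rfl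
          rw [List.getElem?_drop] at h0
          simpa using h0
        have hct : t[m]? = some c := by
          rw [hcs, List.getElem?_append_left h] at hcm
          exact hcm
        have hmem_t : c ∈ t := List.mem_of_getElem? hct
        exact pvTakeWhile_not_mem cs c hmem_t
      · exact h
      · exact absurd hprefn (hmin t.length h)
    rw [hfind, hmn]
  · rw [if_neg hmem]
    exact (PySem.Chars.find_eq_neg_one_iff cs [c]).2
      (fun h => hmem ((List.singleton_infix_iff c cs).1 h))

-- pvStripTags / pvDropTag through a '<'/'>'-free prefix
lemma pvStripTags_append (t r : List Char) (h : '<' ∉ t) :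
    pvStripTags (t ++ r) = t ++ pvStripTags r := by
  induction t with
  | nil => simp
  | cons c u ih =>
    have hc : c ≠ '<' := by intro hc; exact h (by simp [hc])
    have hu : '<' ∉ u := fun hm => h (by simp [hm])
    simp only [List.cons_append, pvStripTags, if_neg hc, ih hu]

lemma pvStripTags_no (t : List Char) (h : '<' ∉ t) : pvStripTags t = t := by
  have := pvStripTags_append t [] h
  simpa [pvStripTags] using this

lemma pvDropTag_append (t r : List Char) (h : '>' ∉ t) :
    pvDropTag (t ++ r) = pvDropTag r := by
  induction t with
  | nil => simp
  | cons c u ih =>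
    have hc : c ≠ '>' := by intro hc; exact h (by simp [hc])
    have hu : '>' ∉ u := fun hm => h (by simp [hm])
    simp only [List.cons_append, pvDropTag, if_neg hc, ih hu]

-- the while loop's segments flatten to pvStripTags
lemma pvSegs_flatten (fuel : Nat) : ∀ cs : List Char, cs.length < fuel →
    (pvSegs fuel cs).flatten = pvStripTags cs := by
  induction fuel with
  | zero => intro cs h; omega
  | succ fuel ih =>
    intro cs hlen
    by_cases hmem : '<' ∈ cs
    · obtain ⟨r, hcs⟩ := pvSplit '<' cs hmem
      set t := cs.takeWhile (fun x => x ≠ '<') with htdef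
      have htn : '<' ∉ t := pvTakeWhile_not_mem cs '<'
      have hfind : PySem.Chars.find cs ['<'] = (t.length : Int) := by
        rw [pvFind_singleton cs '<', if_pos hmem]
      have hlcs : cs.length = t.length + 1 + r.length := by
        rw [hcs]
        simp only [List.length_append, List.length_cons]
        omega
      have hdropn1 : cs.drop (t.length + 1) = r := by
        rw [hcs, show t.length + 1 = (t ++ ['<']).length from by simp,
            show t ++ '<' :: r = (t ++ ['<']) ++ r from by simp]
        exact List.drop_left
      have htake : cs.take t.length = t := by
        rw [hcs]; exact List.take_left
      have hff : PySem.Chars.findFrom cs ['>'] ((t.length : Int) + 1)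
          = if PySem.Chars.find r ['>'] = -1 then -1
            else ((t.length : Int) + 1) + PySem.Chars.find r ['>'] := by
        rw [show ((t.length : Int) + 1) = ((t.length + 1 : Nat) : Int) from by push_cast; ring,
            PySem.Chars.findFrom_natCast cs ['>'] (t.length + 1) (by omega), hdropn1]
      have hstrip : pvStripTags cs = t ++ pvStripTags (pvDropTag r) := by
        rw [hcs, pvStripTags_append _ _ htn]
        simp [pvStripTags]
      by_cases hg : '>' ∈ r
      · obtain ⟨w, hrw⟩ := pvSplit '>' r hg
        set u := r.takeWhile (fun x => x ≠ '>') with hudef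
        have hun : '>' ∉ u := pvTakeWhile_not_mem r '>'
        have hfr : PySem.Chars.find r ['>'] = (u.length : Int) := by
          rw [pvFind_singleton r '>', if_pos hg]
        have hffv : PySem.Chars.findFrom cs ['>'] ((t.length : Int) + 1)
            = (t.length : Int) + 1 + (u.length : Int) := by
          rw [hff, hfr, if_neg (by omega)]
        have hdt : pvDropTag r = w := by
          rw [hrw, pvDropTag_append _ _ hun]
          simp [pvDropTag]
        have hdropk : cs.drop (t.length + u.length + 2) = w := by
          rw [hcs, hrw,
              show t ++ '<' :: (u ++ '>' :: w) = (t ++ '<' :: u ++ ['>']) ++ w from by simp,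
              show t.length + u.length + 2 = (t ++ '<' :: u ++ ['>']).length from by simp; omega]
          exact List.drop_left
        have hwlen : w.length < fuel := by
          have : cs.length = t.length + u.length + 2 + w.length := by
            rw [hcs, hrw]
            simp only [List.length_append, List.length_cons]
            omega
          omega
        simp only [pvSegs, hfind, hffv]
        rw [if_neg (show ¬((t.length : Int) = -1) by omega),
            if_neg (show ¬((t.length : Int) + 1 + (u.length : Int) = -1) by omega),
            show (t.length : Int) + 1 + (u.length : Int) + 1
              = ((t.length + u.length + 2 : Nat) : Int) from by push_cast; ring,
            PySem.List.slice_from cs (by positivity),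
            PySem.List.slice_to cs (by positivity),
            Int.toNat_natCast, Int.toNat_natCast, htake, hdropk,
            List.flatten_cons, ih w hwlen, hstrip, hdt]
      · have hfr : PySem.Chars.find r ['>'] = -1 := by
          rw [pvFind_singleton r '>', if_neg hg]
        have hffv : PySem.Chars.findFrom cs ['>'] ((t.length : Int) + 1) = -1 := by
          rw [hff, hfr, if_pos rfl]
        have hdt : pvDropTag r = [] := by
          have h2 := pvDropTag_append r [] hg
          rw [List.append_nil] at h2
          simpa [pvDropTag] using h2
        simp only [pvSegs, hfind, hffv]
        rw [if_neg (show ¬((t.length : Int) = -1) by omega), if_pos trivial,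
            PySem.List.slice_to cs (by positivity), Int.toNat_natCast, htake]
        rw [hstrip, hdt]
        simp [pvStripTags]
    · have hfind : PySem.Chars.find cs ['<'] = -1 := by
        rw [pvFind_singleton cs '<', if_neg hmem]
      simp only [pvSegs, hfind, if_pos rfl]
      simp [pvStripTags_no cs hmem]

lemma pvClean_eq (s : String) : pvCleanB s = pvCleanA s := by
  rw [pvCleanA_eq, pvCleanB]
  rw [pvSegs_flatten (s.toList.length + 1) s.toList (by omega)]

-- ===== VERDICT (by name: the statement is the Claim_ definition above) =====
theorem decipherData_spec : Claim_equal_decipherData := by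
  intro d _hdom hpre
  unfold Spec_decipherData decipherData decipherData_alt
  rw [PySem.Dict.items_foldl_insert_fresh d Prod.fst
      (fun entry => ((PySem.Dict.mk d).getD entry.1 []).foldl
        (fun newList string => newList ++ [pvCleanA string]) [])
      PySem.Dict.empty (by intro a _; simp) hpre]
  simp only [PySem.Dict.items, PySem.Dict.empty, List.nil_append]
  apply List.map_congr_left
  intro p hp
  have hkeys : (PySem.Dict.mk d).keys.Nodup := by
    rw [PySem.Dict.keys_mk]; exact hpre
  have hlook : (PySem.Dict.mk d).getD p.1 [] = p.2 := by
    apply PySem.Dict.getD_of_mem_items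
    · show (p.1, p.2) ∈ d; simpa using hp
    · exact hkeys
  rw [hlook, PySem.List.foldl_append_singleton_eq_map]
  simp [pvClean_eq]
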